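-- pv_equiv track=rewrite | github.com/Andrey-Bedretdinov/School | Архив/Homework/Homework 21.04.22/main.py | f
-- ===== SOURCE A (Python) =====
-- def f(x):
--     a = 5
--     b = 20
--     while x > 0:
--         d = x % 6
--         a *= d
--         if d < 3:
--             b += d
--         x //= 6
--     return a, b
-- ===== SOURCE B (Python) =====
-- def f(x):
--     # collect base-6 digits of x (empty for x <= 0)
--     digits = []
--     while x > 0:
--         digits.append(x % 6)
--         x //= 6
--     prod = 1
--     for d in digits:
--         prod *= d
--     return 5 * prod, 20 + sum(d for d in digits if d < 3)
-- ===== Notes on version B (the rewrite author's own statement) =====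
-- stated objective: simpler
-- what changed: A fuses digit extraction and both accumulations into one while loop with mutable state; B first materialises the list of base-6 digits and then computes the result as two separate reductions (product, filtered sum) over that list.
import Mathlib
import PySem

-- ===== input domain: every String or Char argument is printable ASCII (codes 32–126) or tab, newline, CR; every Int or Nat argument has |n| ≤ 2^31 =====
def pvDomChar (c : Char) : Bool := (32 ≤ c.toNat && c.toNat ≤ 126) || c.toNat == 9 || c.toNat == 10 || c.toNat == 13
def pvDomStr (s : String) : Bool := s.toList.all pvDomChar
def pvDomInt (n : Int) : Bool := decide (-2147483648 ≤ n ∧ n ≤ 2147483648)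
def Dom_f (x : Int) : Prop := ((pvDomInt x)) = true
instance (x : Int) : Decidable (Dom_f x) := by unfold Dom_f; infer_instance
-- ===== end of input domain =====

-- B splits A's fused while-loop into digit extraction followed by two separate reductions; objective: simpler.

-- ===== PORT A =====
-- A's while loop: mutable a, b updated per base-6 digit.
def fLoop (x a b : Int) : Int × Int :=
  if h : x > 0 then
    let d := PySem.Int.mod x 6
    fLoop (PySem.Int.floordiv x 6) (a * d) (if d < 3 then b + d else b)
  else (a, b)
termination_by x.toNat
decreasing_by
  have h6 : PySem.Int.floordiv x 6 = x / 6 := PySem.Int.floordiv_eq_ediv_of_pos (by norm_num)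
  omega

def f (x : Int) : Int × Int := fLoop x 5 20

-- ===== PORT B =====
-- the `while x > 0: digits.append(x % 6); x //= 6` loop
def digits6 (x : Int) : List Int :=
  if h : x > 0 then PySem.Int.mod x 6 :: digits6 (PySem.Int.floordiv x 6) else []
termination_by x.toNat
decreasing_by
  have h6 : PySem.Int.floordiv x 6 = x / 6 := PySem.Int.floordiv_eq_ediv_of_pos (by norm_num)
  omega

def f_alt (x : Int) : Int × Int :=
  let ds := digits6 x
  (5 * ds.foldl (· * ·) 1, 20 + (ds.filter (fun d => decide (d < 3))).sum)

-- ===== PRECONDITION & SPEC =====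
def Spec_f (x : Int) (out : Int × Int) : Prop := out = f_alt x
instance (x : Int) (out : Int × Int) : Decidable (Spec_f x out) := by unfold Spec_f; infer_instance

-- ===== CLAIM (what is proved, stated in full; the proofs are below) =====
def Claim_equal_f : Prop := ∀ (x : Int), Dom_f x → Spec_f x (f x)

-- ===== LEMMAS AND PROOFS =====

theorem foldl_mul_shift : ∀ (ds : List Int) (c : Int), ds.foldl (· * ·) c = c * ds.foldl (· * ·) 1 := by
  intro ds
  induction ds with
  | nil => intro c; simp
  | cons d ds ih =>
    intro c
    simp only [List.foldl_cons]
    rw [ih (c * d), ih (1 * d)]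
    ring

theorem loop_eq : ∀ (x a b : Int),
    fLoop x a b = (a * (digits6 x).foldl (· * ·) 1,
                   b + ((digits6 x).filter (fun d => decide (d < 3))).sum) := by
  intro x a b
  by_cases h : x > 0
  · rw [fLoop, digits6]
    simp only [h, dif_pos]
    rw [loop_eq (PySem.Int.floordiv x 6)]
    have hm : PySem.Int.mod x 6 = x % 6 := PySem.Int.mod_eq_emod_of_pos (by norm_num)
    simp only [List.foldl_cons, List.filter_cons, hm]
    rw [foldl_mul_shift _ (1 * (x % 6))]
    rw [Prod.mk.injEq]
    refine ⟨by ring, ?_⟩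
    by_cases hd : x % 6 < 3 <;> simp [hd] <;> omega
  · rw [fLoop, digits6]
    simp [h]
termination_by x a b => x.toNat
decreasing_by
  have h6 : PySem.Int.floordiv x 6 = x / 6 := PySem.Int.floordiv_eq_ediv_of_pos (by norm_num)
  omega

-- ===== VERDICT (by name: the statement is the Claim_ definition above) =====
theorem f_spec : Claim_equal_f := by
  intro x _
  unfold Spec_f f f_alt
  rw [loop_eq]
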